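-- pv_equiv track=rewrite | github.com/buffmail/ankiNewCard | tools/ank.py | build_meaning_html
-- ===== SOURCE A (Python) =====
-- def build_meaning_html(meanings, pronunciation):
--     parts = []
--     for idx, meaning in enumerate(meanings):
--         text = meaning.get("meaning", "")
--         example = meaning.get("example")
--         part = text
--         if example:
--             part += '<br><span style="font-size: small;"><i> - ' + example + "</i></span>"
--         if idx != len(meanings) - 1:
--             part += "<br><br>"
--         parts.append(part)
--     if pronunciation:
--         parts.append(
--             f'<br><br><span style="color: #666; font-size: small;">{pronunciation}</span>'
--         )
--     return "".join(parts)
-- ===== SOURCE B (Python) =====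
-- def build_meaning_html(meanings, pronunciation):
--     # Build the meanings block BACK-TO-FRONT: walk the list in reverse, prepending
--     # each formatted meaning (with "<br><br>" before the already-built suffix),
--     # so no parts list, no join and no last-index test are needed.
--     body = ""
--     first = True
--     for m in reversed(meanings):
--         piece = m.get("meaning", "")
--         example = m.get("example")
--         if example:
--             piece += '<br><span style="font-size: small;"><i> - ' + example + "</i></span>"
--         body = piece if first else piece + "<br><br>" + body
--         first = False
--     if pronunciation:
--         body += '<br><br><span style="color: #666; font-size: small;">' + pronunciation + "</span>"
--     return body
-- ===== Notes on version B (the rewrite author's own statement) =====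
-- stated objective: alternative
-- what changed: B builds the meanings block back-to-front: it walks the list in reverse with a (suffix, first) accumulator, prepending each formatted meaning and a "<br><br>" before the already-built suffix, instead of A's forward pass that appends a separator to every part except the last (idx != len-1) and joins a parts list.
import Mathlib
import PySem

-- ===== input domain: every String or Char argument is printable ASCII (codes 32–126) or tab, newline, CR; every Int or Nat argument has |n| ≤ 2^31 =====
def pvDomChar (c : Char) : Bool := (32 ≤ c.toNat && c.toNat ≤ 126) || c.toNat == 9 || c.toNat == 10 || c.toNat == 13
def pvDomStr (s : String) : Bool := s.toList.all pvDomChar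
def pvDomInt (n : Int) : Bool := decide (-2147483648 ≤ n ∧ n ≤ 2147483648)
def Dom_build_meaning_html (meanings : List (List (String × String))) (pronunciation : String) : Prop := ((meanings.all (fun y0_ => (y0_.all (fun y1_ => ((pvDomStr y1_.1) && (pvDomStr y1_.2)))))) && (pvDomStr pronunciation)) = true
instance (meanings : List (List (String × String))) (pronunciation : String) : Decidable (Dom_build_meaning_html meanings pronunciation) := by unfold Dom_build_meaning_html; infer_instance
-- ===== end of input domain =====

-- B builds the meanings block back-to-front (reverse walk, prepending each piece and the
-- separator before the already-built suffix) instead of A's forward parts-list pass with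
-- the idx != len-1 separator test; objective: alternative decomposition, same cost.

-- dict.get on the association list: first matching key (none = absent)
def dget (m : List (String × String)) (k : String) : Option String :=
  (m.find? (fun p => p.1 == k)).map (·.2)

-- ===== PORT A =====
def build_meaning_html (meanings : List (List (String × String))) (pronunciation : String) : String :=
  let parts : List String :=
    (PySem.List.enumerate meanings).foldl (fun parts im =>
      let idx := im.1
      let meaning := im.2
      let text := (dget meaning "meaning").getD ""
      let example_ := dget meaning "example"
      let part := text
      let part :=
        match example_ with
        | some e => if e ≠ "" then part ++ "<br><span style=\"font-size: small;\"><i> - " ++ e ++ "</i></span>" else part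
        | none => part
      let part := if idx ≠ (meanings.length : Int) - 1 then part ++ "<br><br>" else part
      parts ++ [part]) []
  let parts :=
    if pronunciation ≠ "" then
      parts ++ ["<br><br><span style=\"color: #666; font-size: small;\">" ++ pronunciation ++ "</span>"]
    else parts
  PySem.Str.join "" parts

-- ===== PORT B =====
-- B's loop body: format one meaning and prepend it (with the separator) to the suffix built so far
def prepend_step (st : String × Bool) (m : List (String × String)) : String × Bool :=
  let piece := (dget m "meaning").getD ""
  let piece :=
    match dget m "example" with
    | some e => if e ≠ "" then piece ++ "<br><span style=\"font-size: small;\"><i> - " ++ e ++ "</i></span>" else piece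
    | none => piece
  (if st.2 then piece else piece ++ "<br><br>" ++ st.1, false)

def build_meaning_html_alt (meanings : List (List (String × String))) (pronunciation : String) : String :=
  let st := meanings.reverse.foldl prepend_step ("", true)
  let body := st.1
  if pronunciation ≠ "" then
    body ++ "<br><br><span style=\"color: #666; font-size: small;\">" ++ pronunciation ++ "</span>"
  else body

-- ===== PRECONDITION & SPEC =====
def Spec_build_meaning_html (meanings : List (List (String × String))) (pronunciation : String) (out : String) : Prop := out = build_meaning_html_alt meanings pronunciation
instance (meanings : List (List (String × String))) (pronunciation : String) (out : String) : Decidable (Spec_build_meaning_html meanings pronunciation out) := by unfold Spec_build_meaning_html; infer_instance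

-- ===== CLAIM (what is proved, stated in full; the proofs are below) =====
def Claim_equal_build_meaning_html : Prop := ∀ (meanings : List (List (String × String))) (pronunciation : String), Dom_build_meaning_html meanings pronunciation → Spec_build_meaning_html meanings pronunciation (build_meaning_html meanings pronunciation)

-- ===== LEMMAS AND PROOFS =====

-- the inner HTML of one meaning (proof-side abbreviation; neither port uses it)
def inner_html (meaning : List (String × String)) : String :=
  let part := (dget meaning "meaning").getD ""
  match dget meaning "example" with
  | some e => if e ≠ "" then part ++ "<br><span style=\"font-size: small;\"><i> - " ++ e ++ "</i></span>" else part
  | none => part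

theorem str_of_toList {s t : String} (h : s.toList = t.toList) : s = t :=
  String.toList_inj.mp h

theorem join_nil_str (sep : String) : PySem.Str.join sep [] = "" := by
  apply str_of_toList
  simp [PySem.Str.toList_join, PySem.Chars.join_nil]

theorem join_singleton_str (sep a : String) : PySem.Str.join sep [a] = a := by
  apply str_of_toList
  simp [PySem.Str.toList_join, PySem.Chars.join_singleton]

theorem join_empty_cons (a : String) (rest : List String) :
    PySem.Str.join "" (a :: rest) = a ++ PySem.Str.join "" rest := by
  apply str_of_toList
  cases rest with
  | nil => simp [PySem.Str.toList_join, PySem.Chars.join_singleton, PySem.Chars.join_nil]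
  | cons b r =>
      simp [PySem.Str.toList_join, PySem.Chars.join_cons_cons]

theorem join_empty_snoc (l : List String) (x : String) :
    PySem.Str.join "" (l ++ [x]) = PySem.Str.join "" l ++ x := by
  induction l with
  | nil => simp [join_nil_str, join_empty_cons]
  | cons a l ih =>
      simp only [List.cons_append, join_empty_cons, ih, String.append_assoc]

theorem join_sep_cons_cons (sep a b : String) (rest : List String) :
    PySem.Str.join sep (a :: b :: rest) = a ++ sep ++ PySem.Str.join sep (b :: rest) := by
  apply str_of_toList
  simp [PySem.Str.toList_join, PySem.Chars.join_cons_cons]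

theorem foldl_snoc {α : Type} (f : α → String) (l : List α) (init : List String) :
    l.foldl (fun acc x => acc ++ [f x]) init = init ++ l.map f := by
  induction l generalizing init with
  | nil => simp
  | cons x l ih => simp [List.foldl_cons, ih]

-- the separator lemma: "".join of A's last-marked parts = sep.join of the bare parts
theorem join_marked (ms : List (List (String × String))) (k n : Int)
    (h : k + ms.length = n) :
    PySem.Str.join "" ((PySem.List.enumerate ms k).map
      (fun im => inner_html im.2 ++ (if im.1 ≠ n - 1 then "<br><br>" else "")))
    = PySem.Str.join "<br><br>" (ms.map inner_html) := by
  induction ms generalizing k with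
  | nil => simp [PySem.List.enumerate_nil, join_nil_str]
  | cons m rest ih =>
      cases rest with
      | nil =>
          have hk : k = n - 1 := by simp at h; omega
          simp [PySem.List.enumerate_cons, PySem.List.enumerate_nil, hk, join_singleton_str]
      | cons m' r =>
          have hk : k ≠ n - 1 := by
            simp [List.length_cons] at h; intro hkk; omega
          have h' : (k + 1) + (m' :: r).length = n := by
            simp [List.length_cons] at h ⊢; omega
          rw [PySem.List.enumerate_cons, List.map_cons, join_empty_cons,
            ih (k + 1) h']
          simp only [List.map_cons, join_sep_cons_cons]
          simp [hk, String.append_assoc]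

-- A's loop body, rewritten via inner_html
theorem a_body_eq (meanings : List (List (String × String))) (im : Int × List (String × String)) :
    (let text := (dget im.2 "meaning").getD ""
     let example_ := dget im.2 "example"
     let part := text
     let part :=
       match example_ with
       | some e => if e ≠ "" then part ++ "<br><span style=\"font-size: small;\"><i> - " ++ e ++ "</i></span>" else part
       | none => part
     if im.1 ≠ (meanings.length : Int) - 1 then part ++ "<br><br>" else part)
    = inner_html im.2 ++ (if im.1 ≠ (meanings.length : Int) - 1 then "<br><br>" else "") := by
  unfold inner_html
  split_ifs with h <;> simp

-- B's reverse fold, characterised: its string is the sep-join, its flag records emptiness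
theorem prepend_fold_eq (ms : List (List (String × String))) :
    ms.reverse.foldl prepend_step ("", true)
      = (PySem.Str.join "<br><br>" (ms.map inner_html), ms.isEmpty) := by
  rw [List.foldl_reverse]
  induction ms with
  | nil => simp [join_nil_str]
  | cons m rest ih =>
      rw [List.foldr_cons, ih]
      cases rest with
      | nil =>
          simp [prepend_step, inner_html, join_singleton_str]
      | cons m' r =>
          simp [prepend_step, inner_html, List.map_cons, join_sep_cons_cons,
            String.append_assoc]

-- ===== VERDICT (by name: the statement is the Claim_ definition above) =====
theorem build_meaning_html_spec : Claim_equal_build_meaning_html := by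
  intro meanings pronunciation _
  unfold Spec_build_meaning_html build_meaning_html build_meaning_html_alt
  simp only [foldl_snoc, List.nil_append, prepend_fold_eq]
  have hmap : (PySem.List.enumerate meanings).map
      (fun im => (let text := (dget im.2 "meaning").getD ""
        let example_ := dget im.2 "example"
        let part := text
        let part :=
          match example_ with
          | some e => if e ≠ "" then part ++ "<br><span style=\"font-size: small;\"><i> - " ++ e ++ "</i></span>" else part
          | none => part
        if im.1 ≠ (meanings.length : Int) - 1 then part ++ "<br><br>" else part))
      = (PySem.List.enumerate meanings).map
        (fun im => inner_html im.2 ++ (if im.1 ≠ (meanings.length : Int) - 1 then "<br><br>" else "")) := by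
    apply List.map_congr_left
    intro im _
    exact a_body_eq meanings im
  split_ifs with hp
  · rw [hmap, join_empty_snoc, join_marked meanings 0 meanings.length (by simp)]
    simp [String.append_assoc]
  · rw [hmap, join_marked meanings 0 meanings.length (by simp)]
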